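-- pv_equiv track=rewrite | github.com/pypi-data/pypi-mirror-398 | packages/mudyla/mudyla-0.4.0-py3-none-any.whl/mudyla/ast/expansions.py | to_bash_value
-- ===== SOURCE A (Python) =====
-- from typing import Any
--
-- def _escape_bash_string(s: str) -> str:
--     """Escape a string for use in bash double quotes."""
--     # Escape backslashes first, then double quotes, then dollar signs, then backticks
--     s = s.replace("\\", "\\\\")
--     s = s.replace('"', '\\"')
--     s = s.replace("$", "\\$")
--     s = s.replace("`", "\\`")
--     return s
--
-- def to_bash_value(value: Any) -> str:
--     """Convert a value to a bash-compatible string.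
--
--     - None -> ""
--     - True -> "1"
--     - False -> "0"
--     - list/tuple -> bash array syntax: ("value1" "value2" "value3")
--     - Other -> str(value)
--
--     NOTE: For scalar values, they are NOT shell-escaped. If a value may contain
--     spaces or special characters and is used in an unquoted context, the user
--     must quote it in their bash script. Example: ret "value:string=${action.foo.bar}"
--
--     For arrays, values ARE escaped and quoted to ensure proper handling.
--     """
--     if value is None:
--         return ""
--     if isinstance(value, bool):
--         return "1" if value else "0"
--     if isinstance(value, (list, tuple)):
--         # Format as bash array: ("value1" "value2" "value3")
--         escaped_values = [f'"{_escape_bash_string(str(v))}"' for v in value]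
--         return "(" + " ".join(escaped_values) + ")"
--     return str(value)
-- ===== SOURCE B (Python) =====
-- def to_bash_value(value):
--     """Convert a value to a bash-compatible string (single-pass escaping,
--     output built incrementally instead of map+join over four replace passes)."""
--     if value is None:
--         return ""
--     if isinstance(value, bool):
--         return "1" if value else "0"
--     if isinstance(value, (list, tuple)):
--         out = ["("]
--         first = True
--         for v in value:
--             if not first:
--                 out.append(" ")
--             first = False
--             out.append('"')
--             for ch in str(v):
--                 if ch in '\\"$`':
--                     out.append("\\")
--                 out.append(ch)
--             out.append('"')
--         out.append(")")
--         return "".join(out)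
--     return str(value)
-- ===== Notes on version B (the rewrite author's own statement) =====
-- stated objective: alternative
-- what changed: Replaces the four sequential str.replace escaping passes and the map+join array formatting with one incremental pass: a single loop over the items that appends separators, quotes and per-character escapes (backslash inserted before \, ", $, `) to an output buffer.
import Mathlib
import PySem

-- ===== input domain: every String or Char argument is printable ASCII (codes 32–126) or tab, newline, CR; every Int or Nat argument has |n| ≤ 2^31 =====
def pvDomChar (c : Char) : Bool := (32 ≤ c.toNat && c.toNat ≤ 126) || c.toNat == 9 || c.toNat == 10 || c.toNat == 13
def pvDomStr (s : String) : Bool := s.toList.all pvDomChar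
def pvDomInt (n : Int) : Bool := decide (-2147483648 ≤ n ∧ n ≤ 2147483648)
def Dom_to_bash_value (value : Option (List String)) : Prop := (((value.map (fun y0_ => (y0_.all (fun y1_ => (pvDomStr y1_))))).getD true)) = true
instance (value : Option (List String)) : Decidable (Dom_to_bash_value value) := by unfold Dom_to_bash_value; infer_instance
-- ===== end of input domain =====

-- B replaces A's four sequential replace passes + map/join with one incremental pass (alternative, same cost).
-- The given type Option (List String) only reaches A's None branch and list branch; the bool/scalar branches are unreachable and not ported.

-- ===== PORT A =====
-- _escape_bash_string: four sequential replaces, in A's order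
def pvEscapeA (s : String) : String :=
  let s1 := PySem.Str.replace s "\\" "\\\\"
  let s2 := PySem.Str.replace s1 "\"" "\\\""
  let s3 := PySem.Str.replace s2 "$" "\\$"
  PySem.Str.replace s3 "`" "\\`"

def to_bash_value (value : Option (List String)) : String :=
  match value with
  | none => ""                                  -- value is None
  | some vs =>                                  -- isinstance(value, (list, tuple))
      let escaped := vs.map (fun v => "\"" ++ pvEscapeA v ++ "\"")   -- str(v) = v for strings
      "(" ++ PySem.Str.join " " escaped ++ ")"

-- ===== PORT B =====
def pvSpecial (c : Char) : Bool := c == '\\' || c == '"' || c == '$' || c == '`'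

-- inner per-character loop of Source B ("if ch in '\\"$`': append '\\'; append ch")
def pvEscAlt (s : List Char) : List Char :=
  s.foldl (fun acc c => acc ++ ((if pvSpecial c then ['\\'] else []) ++ [c])) []

-- one item of Source B's outer loop: separator (unless first), opening quote, escaped chars, closing quote
def pvStepB (st : List Char × Bool) (v : String) : List Char × Bool :=
  (st.1 ++ (if st.2 then [] else [' ']) ++ ['"'] ++ pvEscAlt v.toList ++ ['"'], false)

def to_bash_value_alt (value : Option (List String)) : String :=
  match value with
  | none => ""
  | some vs =>
      let st := vs.foldl pvStepB (['('], true)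
      String.ofList (st.1 ++ [')'])

-- ===== PRECONDITION & SPEC =====
def Spec_to_bash_value (value : Option (List String)) (out : String) : Prop := out = to_bash_value_alt value
instance (value : Option (List String)) (out : String) : Decidable (Spec_to_bash_value value out) := by unfold Spec_to_bash_value; infer_instance

-- ===== CLAIM (what is proved, stated in full; the proofs are below) =====
def Claim_equal_to_bash_value : Prop := ∀ (value : Option (List String)), Dom_to_bash_value value → Spec_to_bash_value value (to_bash_value value)

-- ===== LEMMAS AND PROOFS =====

-- per-character escape map (what one pass of B inserts for a character)
def pvG (c : Char) : List Char := (if pvSpecial c then ['\\'] else []) ++ [c]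

-- replace.go on a single-character pattern is a flatMap
theorem pv_go_single (o : Char) (new : List Char) :
    ∀ (s : List Char) (fuel : Nat) (acc : List Char), s.length ≤ fuel →
      PySem.Chars.replace.go [o] new fuel s acc
        = acc.reverse ++ s.flatMap (fun c => if c = o then new else [c]) := by
  intro s
  induction s with
  | nil =>
      intro fuel acc _
      cases fuel <;> simp [PySem.Chars.replace.go.eq_def]
  | cons c t ih =>
      intro fuel acc hle
      cases fuel with
      | zero => simp at hle
      | succ f =>
        rw [PySem.Chars.replace.go.eq_def]
        simp only [List.isPrefixOf, Bool.and_true]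
        by_cases h : o = c
        · subst h
          simp only [beq_self_eq_true, if_pos, List.length_cons] at *
          simp only [List.length_nil, Nat.zero_add, List.drop_succ_cons, List.drop_zero]
          rw [ih f (new.reverse ++ acc) (by omega)]
          simp
        · have : (o == c) = false := by simpa using h
          simp only [this, if_neg Bool.false_ne_true]
          rw [ih f (c :: acc) (by simpa using Nat.le_of_succ_le_succ hle)]
          rw [List.flatMap_cons, if_neg (show ¬ c = o from fun hh => h hh.symm)]
          simp

theorem pv_replace_single (s : List Char) (o : Char) (new : List Char) :
    PySem.Chars.replace s [o] new = s.flatMap (fun c => if c = o then new else [c]) := by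
  rw [PySem.Chars.replace]
  simp only [List.isEmpty_cons, if_neg Bool.false_ne_true]
  simpa using pv_go_single o new s s.length [] (le_refl _)

-- the composed four single-char replaces act per character like pvG
theorem pv_chain_char (c : Char) :
    ((((if c = '\\' then ['\\', '\\'] else [c]).flatMap
        (fun c => if c = '"' then ['\\', '"'] else [c])).flatMap
        (fun c => if c = '$' then ['\\', '$'] else [c])).flatMap
        (fun c => if c = '`' then ['\\', '`'] else [c])) = pvG c := by
  by_cases h1 : c = '\\'
  · subst h1; decide
  by_cases h2 : c = '"'
  · subst h2; decide
  by_cases h3 : c = '$'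
  · subst h3; decide
  by_cases h4 : c = '`'
  · subst h4; decide
  simp [h1, h2, h3, h4, pvG, pvSpecial]

theorem pv_chainL (l : List Char) :
    ((((l.flatMap (fun c => if c = '\\' then ['\\', '\\'] else [c])).flatMap
        (fun c => if c = '"' then ['\\', '"'] else [c])).flatMap
        (fun c => if c = '$' then ['\\', '$'] else [c])).flatMap
        (fun c => if c = '`' then ['\\', '`'] else [c])) = l.flatMap pvG := by
  induction l with
  | nil => simp
  | cons c t ih =>
      simp only [List.flatMap_cons, List.flatMap_append]
      rw [pv_chain_char c, ih]

-- A's escape, on char lists, is one flatMap of pvG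
theorem pv_escapeA_toList (s : String) :
    (pvEscapeA s).toList = s.toList.flatMap pvG := by
  show (PySem.Str.replace (PySem.Str.replace (PySem.Str.replace (PySem.Str.replace s "\\" "\\\\") "\"" "\\\"") "$" "\\$") "`" "\\`").toList
      = s.toList.flatMap pvG
  simp only [PySem.Str.toList_replace]
  show PySem.Chars.replace (PySem.Chars.replace (PySem.Chars.replace (PySem.Chars.replace s.toList ['\\'] ['\\','\\']) ['"'] ['\\','"']) ['$'] ['\\','$']) ['`'] ['\\','`']
      = s.toList.flatMap pvG
  rw [pv_replace_single, pv_replace_single, pv_replace_single, pv_replace_single]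
  exact pv_chainL s.toList

-- B's inner loop is the same flatMap
theorem pv_escAlt_eq (s : List Char) : pvEscAlt s = s.flatMap pvG := by
  unfold pvEscAlt
  simpa [pvG] using PySem.List.foldl_append_eq_flatMap (fun c => (if pvSpecial c then ['\\'] else []) ++ [c]) s []

-- B's outer loop, once past the first element
theorem pv_foldB (vs : List String) : ∀ acc : List Char,
    (vs.foldl pvStepB (acc, false)).1
    = acc ++ vs.flatMap (fun v => ' ' :: '"' :: (pvEscAlt v.toList ++ ['"'])) := by
  induction vs with
  | nil => intro acc; simp
  | cons v t ih =>
      intro acc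
      rw [List.foldl_cons,
          show pvStepB (acc, false) v
              = (acc ++ [' '] ++ ['"'] ++ pvEscAlt v.toList ++ ['"'], false) from rfl,
          ih]
      simp

-- A's join over the quoted items, as a char list
theorem pv_joinA (v : String) (t : List String) :
    PySem.Chars.join [' '] ((v :: t).map (fun w => '"' :: (pvEscapeA w).toList ++ ['"']))
    = ('"' :: (pvEscapeA v).toList ++ ['"'])
      ++ t.flatMap (fun w => ' ' :: '"' :: ((pvEscapeA w).toList ++ ['"'])) := by
  induction t generalizing v with
  | nil => rw [List.map_cons, List.map_nil, PySem.Chars.join_singleton]; simp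
  | cons w t ih =>
      have hw := ih w
      rw [List.map_cons] at hw
      rw [List.map_cons, List.map_cons, PySem.Chars.join_cons_cons, hw]
      simp

theorem pv_main (value : Option (List String)) :
    to_bash_value value = to_bash_value_alt value := by
  cases value with
  | none => rfl
  | some vs =>
      cases vs with
      | nil => decide
      | cons v t =>
        show "(" ++ PySem.Str.join " " ((v :: t).map (fun w => "\"" ++ pvEscapeA w ++ "\"")) ++ ")"
            = String.ofList (((v :: t).foldl pvStepB (['('], true)).1 ++ [')'])
        rw [List.foldl_cons,
            show pvStepB (['('], true) v
                = (['('] ++ ['"'] ++ pvEscAlt v.toList ++ ['"'], false) from rfl,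
            pv_foldB]
        apply String.ext               -- compare as char lists
        simp only [String.toList_ofList, String.toList_append, PySem.Str.toList_join]
        rw [show (" " : String).toList = [' '] from rfl]
        rw [show ((v :: t).map (fun w => "\"" ++ pvEscapeA w ++ "\"")).map String.toList
              = (v :: t).map (fun w => '"' :: (pvEscapeA w).toList ++ ['"']) by
            simp [String.toList_append]]
        rw [pv_joinA]
        simp [pv_escAlt_eq, pv_escapeA_toList]

-- ===== VERDICT (by name: the statement is the Claim_ definition above) =====
theorem to_bash_value_spec : Claim_equal_to_bash_value := by
  intro value _
  unfold Spec_to_bash_value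
  exact pv_main value
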